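-- pv_equiv track=rewrite | github.com/dcversus/dcmaidbot | src/core/services/rpg_service.py | _get_starting_stats
-- ===== SOURCE A (Python) =====
-- from typing import Any, Optional
--
-- def _get_starting_stats(
--     character_class: Optional[str], difficulty_level: str
-- ) -> dict:
--     """Get starting stats based on character class and difficulty."""
--     base_stats = {
--         "strength": 10,
--         "intelligence": 10,
--         "dexterity": 10,
--         "constitution": 10,
--         "wisdom": 10,
--         "charisma": 10,
--     }
--
--     # Adjust based on character class
--     if character_class == "warrior":
--         base_stats["strength"] += 2
--         base_stats["constitution"] += 2
--     elif character_class == "mage":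
--         base_stats["intelligence"] += 2
--         base_stats["wisdom"] += 2
--     elif character_class == "rogue":
--         base_stats["dexterity"] += 2
--         base_stats["charisma"] += 1
--
--     # Adjust based on difficulty
--     if difficulty_level == "easy":
--         for stat in base_stats:
--             base_stats[stat] += 2
--     elif difficulty_level == "hard":
--         for stat in base_stats:
--             base_stats[stat] = max(5, base_stats[stat] - 1)
--     elif difficulty_level == "expert":
--         for stat in base_stats:
--             base_stats[stat] = max(3, base_stats[stat] - 2)
--
--     return base_stats
-- ===== SOURCE B (Python) =====
-- from typing import Any, Optional
--
-- _STATS = ("strength", "intelligence", "dexterity", "constitution", "wisdom", "charisma")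
--
-- # (class, stat) -> bonus; any pair not listed contributes 0
-- _BONUS = {
--     ("warrior", "strength"): 2, ("warrior", "constitution"): 2,
--     ("mage", "intelligence"): 2, ("mage", "wisdom"): 2,
--     ("rogue", "dexterity"): 2, ("rogue", "charisma"): 1,
-- }
--
-- _DELTA = {"easy": 2, "hard": -1, "expert": -2}
--
--
-- def _get_starting_stats(
--     character_class: Optional[str], difficulty_level: str
-- ) -> dict:
--     """Get starting stats based on character class and difficulty.
--
--     Closed form per stat: 10 + class bonus + difficulty delta. The hard/expert
--     floors (5 and 3) in the original can never bind, since every pre-clamp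
--     value is at least 10 - 2 = 8.
--     """
--     delta = _DELTA.get(difficulty_level, 0)
--     return {s: 10 + _BONUS.get((character_class, s), 0) + delta for s in _STATS}
-- ===== Notes on version B (the rewrite author's own statement) =====
-- stated objective: simpler
-- what changed: B replaces A's mutate-in-stages approach (build dict, if/elif class mutation, three clamping difficulty loops) with a single closed-form comprehension computing each stat as 10 + class bonus + difficulty delta, dropping the max() floors entirely because every pre-clamp value is at least 8 so the floors 5 and 3 can never bind.
import Mathlib
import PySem

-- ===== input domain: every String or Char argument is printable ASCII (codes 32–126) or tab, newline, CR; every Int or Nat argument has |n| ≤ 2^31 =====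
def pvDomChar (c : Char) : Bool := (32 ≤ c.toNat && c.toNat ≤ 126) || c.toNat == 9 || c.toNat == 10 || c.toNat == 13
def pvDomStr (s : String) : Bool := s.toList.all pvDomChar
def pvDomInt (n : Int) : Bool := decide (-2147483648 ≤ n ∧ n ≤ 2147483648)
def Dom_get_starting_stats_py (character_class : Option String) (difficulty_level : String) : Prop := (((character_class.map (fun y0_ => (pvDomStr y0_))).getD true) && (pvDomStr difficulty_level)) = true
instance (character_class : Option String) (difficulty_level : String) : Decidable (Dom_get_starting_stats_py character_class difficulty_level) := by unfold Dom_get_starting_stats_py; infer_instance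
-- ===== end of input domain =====

-- B computes each stat in one closed-form pass (10 + class bonus + difficulty delta), without
-- A's staged mutation or its max() floors (which can never bind since pre-clamp values are ≥ 8).

-- ===== PORT A =====
-- literal transliteration of A's if/elif chains; the Python dict is a PySem.Dict, returned as its items
def get_starting_stats_py (character_class : Option String) (difficulty_level : String) : List (String × Int) :=
  let base : PySem.Dict String Int :=
    ⟨[("strength", 10), ("intelligence", 10), ("dexterity", 10),
      ("constitution", 10), ("wisdom", 10), ("charisma", 10)]⟩
  let base :=
    if character_class = some "warrior" then
      ((base.modify "strength" 0 (· + 2)).modify "constitution" 0 (· + 2))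
    else if character_class = some "mage" then
      ((base.modify "intelligence" 0 (· + 2)).modify "wisdom" 0 (· + 2))
    else if character_class = some "rogue" then
      ((base.modify "dexterity" 0 (· + 2)).modify "charisma" 0 (· + 1))
    else base
  let base :=
    if difficulty_level = "easy" then
      base.keys.foldl (fun d s => d.modify s 0 (· + 2)) base
    else if difficulty_level = "hard" then
      base.keys.foldl (fun d s => d.modify s 0 (fun v => max 5 (v - 1))) base
    else if difficulty_level = "expert" then
      base.keys.foldl (fun d s => d.modify s 0 (fun v => max 3 (v - 2))) base
    else base
  base.items

-- ===== PORT B =====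
def pvStats : List String :=
  ["strength", "intelligence", "dexterity", "constitution", "wisdom", "charisma"]

-- (class, stat) -> bonus; Python keys are (character_class, stat) pairs, class may be None
def pvBonus : PySem.Dict (Option String × String) Int :=
  ⟨[((some "warrior", "strength"), 2), ((some "warrior", "constitution"), 2),
    ((some "mage", "intelligence"), 2), ((some "mage", "wisdom"), 2),
    ((some "rogue", "dexterity"), 2), ((some "rogue", "charisma"), 1)]⟩

def pvDelta : PySem.Dict String Int :=
  ⟨[("easy", 2), ("hard", -1), ("expert", -2)]⟩

def get_starting_stats_py_alt (character_class : Option String) (difficulty_level : String) : List (String × Int) :=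
  let delta := pvDelta.getD difficulty_level 0
  pvStats.map (fun s => (s, 10 + pvBonus.getD (character_class, s) 0 + delta))

-- ===== PRECONDITION & SPEC =====
def Spec_get_starting_stats_py (character_class : Option String) (difficulty_level : String) (out : List (String × Int)) : Prop := out = get_starting_stats_py_alt character_class difficulty_level
instance (character_class : Option String) (difficulty_level : String) (out : List (String × Int)) : Decidable (Spec_get_starting_stats_py character_class difficulty_level out) := by unfold Spec_get_starting_stats_py; infer_instance

-- ===== CLAIM (what is proved, stated in full; the proofs are below) =====
def Claim_equal_get_starting_stats_py : Prop := ∀ (character_class : Option String) (difficulty_level : String), Dom_get_starting_stats_py character_class difficulty_level → Spec_get_starting_stats_py character_class difficulty_level (get_starting_stats_py character_class difficulty_level)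

-- ===== LEMMAS AND PROOFS =====
-- an unknown difficulty level misses B's delta table
theorem pvDelta_none (dl : String) (g1 : dl ≠ "easy") (g2 : dl ≠ "hard") (g3 : dl ≠ "expert") :
    pvDelta.getD dl 0 = 0 := by
  simp [pvDelta, PySem.Dict.getD_eq_get?_getD, PySem.Dict.get?,
    Ne.symm g1, Ne.symm g2, Ne.symm g3]

-- an unknown class misses every key of B's bonus table
theorem pvBonus_none (c : String) (s : String)
    (h1 : c ≠ "warrior") (h2 : c ≠ "mage") (h3 : c ≠ "rogue") :
    pvBonus.getD (some c, s) 0 = 0 := by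
  simp [pvBonus, PySem.Dict.getD_eq_get?_getD, PySem.Dict.get?,
    Ne.symm h1, Ne.symm h2, Ne.symm h3]

theorem gss_eq (character_class : Option String) (difficulty_level : String) :
    get_starting_stats_py character_class difficulty_level
      = get_starting_stats_py_alt character_class difficulty_level := by
  by_cases h1 : character_class = some "warrior"
  · subst h1
    by_cases g1 : difficulty_level = "easy"
    · subst g1; decide
    · by_cases g2 : difficulty_level = "hard"
      · subst g2; decide
      · by_cases g3 : difficulty_level = "expert"
        · subst g3; decide
        · simp only [get_starting_stats_py, get_starting_stats_py_alt,
            pvDelta_none difficulty_level g1 g2 g3, if_neg g1, if_neg g2, if_neg g3]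
          decide
  · by_cases h2 : character_class = some "mage"
    · subst h2
      by_cases g1 : difficulty_level = "easy"
      · subst g1; decide
      · by_cases g2 : difficulty_level = "hard"
        · subst g2; decide
        · by_cases g3 : difficulty_level = "expert"
          · subst g3; decide
          · simp only [get_starting_stats_py, get_starting_stats_py_alt,
              pvDelta_none difficulty_level g1 g2 g3, if_neg g1, if_neg g2, if_neg g3,
              if_neg h1]
            decide
    · by_cases h3 : character_class = some "rogue"
      · subst h3
        by_cases g1 : difficulty_level = "easy"
        · subst g1; decide
        · by_cases g2 : difficulty_level = "hard"
          · subst g2; decide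
          · by_cases g3 : difficulty_level = "expert"
            · subst g3; decide
            · simp only [get_starting_stats_py, get_starting_stats_py_alt,
                pvDelta_none difficulty_level g1 g2 g3, if_neg g1, if_neg g2, if_neg g3,
                if_neg h1, if_neg h2]
              decide
      · cases character_class with
        | none =>
          by_cases g1 : difficulty_level = "easy"
          · subst g1; decide
          · by_cases g2 : difficulty_level = "hard"
            · subst g2; decide
            · by_cases g3 : difficulty_level = "expert"
              · subst g3; decide
              · simp only [get_starting_stats_py, get_starting_stats_py_alt,
                  pvDelta_none difficulty_level g1 g2 g3,
                  if_neg h1, if_neg h2, if_neg h3, if_neg g1, if_neg g2, if_neg g3]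
                decide
        | some c =>
          have hc1 : c ≠ "warrior" := fun h => h1 (by rw [h])
          have hc2 : c ≠ "mage" := fun h => h2 (by rw [h])
          have hc3 : c ≠ "rogue" := fun h => h3 (by rw [h])
          have hb : ∀ s, pvBonus.getD (some c, s) 0 = 0 :=
            fun s => pvBonus_none c s hc1 hc2 hc3
          by_cases g1 : difficulty_level = "easy"
          · subst g1
            simp only [get_starting_stats_py, get_starting_stats_py_alt,
              if_neg h1, if_neg h2, if_neg h3, hb]
            decide
          · by_cases g2 : difficulty_level = "hard"
            · subst g2
              simp only [get_starting_stats_py, get_starting_stats_py_alt,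
                if_neg h1, if_neg h2, if_neg h3, hb]
              decide
            · by_cases g3 : difficulty_level = "expert"
              · subst g3
                simp only [get_starting_stats_py, get_starting_stats_py_alt,
                  if_neg h1, if_neg h2, if_neg h3, hb]
                decide
              · simp only [get_starting_stats_py, get_starting_stats_py_alt,
                  pvDelta_none difficulty_level g1 g2 g3, hb,
                  if_neg h1, if_neg h2, if_neg h3, if_neg g1, if_neg g2, if_neg g3]
                decide

-- ===== VERDICT (by name: the statement is the Claim_ definition above) =====
theorem get_starting_stats_py_spec : Claim_equal_get_starting_stats_py := by
  intro cc dl _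
  exact gss_eq cc dl
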